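-- pv_equiv track=rewrite | github.com/YannMartinDes/RIMEL_Project | parserV0.py | findEndIndex
-- ===== SOURCE A (Python) =====
-- def findEndIndex(string):
--     count=0
--     for i in range(len(string)):
--         if ((string[i]=='{') or (string[i]=='(')):
--             count=count+1
--         if ((string[i]=='}') or (string[i]==')')):
--             count=count-1
--         if (count==0 and string[i]==";"):
--             return i
--     return None
-- ===== SOURCE B (Python) =====
-- def findEndIndex(string):
--     bal = 0
--     pos = 0
--     for seg in string.split(';'):
--         bal += seg.count('{') + seg.count('(') - seg.count('}') - seg.count(')')
--         pos += len(seg)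
--         if pos < len(string):  # a separator sits at index pos
--             if bal == 0:
--                 return pos
--             pos += 1
--     return None
-- ===== Notes on version B (the rewrite author's own statement) =====
-- stated objective: faster
-- what changed: Instead of A's per-character state machine over indices, B splits the string on the separator and scans the segments, adding each segment's bracket counts (str.count) to a running balance and returning the position of the first separator reached with balance zero.
import Mathlib
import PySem

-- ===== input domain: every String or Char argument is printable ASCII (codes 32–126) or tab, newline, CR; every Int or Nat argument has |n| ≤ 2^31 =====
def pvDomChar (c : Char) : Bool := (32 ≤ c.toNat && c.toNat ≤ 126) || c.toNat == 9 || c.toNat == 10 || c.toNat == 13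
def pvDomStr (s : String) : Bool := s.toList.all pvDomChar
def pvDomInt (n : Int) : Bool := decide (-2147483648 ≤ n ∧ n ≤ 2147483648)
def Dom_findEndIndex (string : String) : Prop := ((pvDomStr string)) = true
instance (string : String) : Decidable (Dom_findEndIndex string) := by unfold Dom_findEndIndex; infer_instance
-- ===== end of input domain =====

-- B replaces A's per-character counter loop by a scan over the ';'-separated segments, adding each
-- segment's bracket counts at once (alternative decomposition, same O(n)).

-- ===== PORT A =====
-- A's loop over range(len(string)) with a running count, ported as structural recursion over the
-- characters carrying the index i and count; branches in A's order.
def findEndIndexGo (cs : List Char) (count : Int) (i : Nat) : Option Int :=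
  match cs with
  | [] => none
  | c :: rest =>
    let count1 := if c = '{' ∨ c = '(' then count + 1 else count
    let count2 := if c = '}' ∨ c = ')' then count1 - 1 else count1
    if count2 = 0 ∧ c = ';' then some (i : Int) else findEndIndexGo rest count2 (i + 1)

def findEndIndex (string : String) : Option Int :=
  findEndIndexGo string.toList 0 0

-- ===== PORT B =====
-- Source B's per-segment balance: seg.count('{') + seg.count('(') - seg.count('}') - seg.count(')')
def pvSegCount (seg : List Char) : Int :=
  (seg.count '{' : Int) + (seg.count '(' : Int) - (seg.count '}' : Int) - (seg.count ')' : Int)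

-- Source B's for-loop over string.split(';') carrying bal and pos (total = len(string)).
def findEndIndexAltGo (segs : List (List Char)) (bal : Int) (pos : Nat) (total : Nat) : Option Int :=
  match segs with
  | [] => none
  | seg :: rest =>
    let bal' := bal + pvSegCount seg
    let pos' := pos + seg.length
    if pos' < total then
      if bal' = 0 then some (pos' : Int)
      else findEndIndexAltGo rest bal' (pos' + 1) total
    else findEndIndexAltGo rest bal' pos' total

-- string.split(';') on a one-character separator = List.splitOn ';' on the characters (exact here).
def findEndIndex_alt (string : String) : Option Int :=
  findEndIndexAltGo (string.toList.splitOn ';') 0 0 string.toList.length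

-- ===== PRECONDITION & SPEC =====
def Spec_findEndIndex (string : String) (out : Option Int) : Prop := out = findEndIndex_alt string
instance (string : String) (out : Option Int) : Decidable (Spec_findEndIndex string out) := by unfold Spec_findEndIndex; infer_instance

-- ===== CLAIM (what is proved, stated in full; the proofs are below) =====
def Claim_equal_findEndIndex : Prop := ∀ (string : String), Dom_findEndIndex string → Spec_findEndIndex string (findEndIndex string)

-- ===== LEMMAS AND PROOFS =====

def pvDelta (c : Char) : Int :=
  (if c = '{' ∨ c = '(' then (1 : Int) else 0) - (if c = '}' ∨ c = ')' then (1 : Int) else 0)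

lemma pvSegCount_cons (c : Char) (s : List Char) :
    pvSegCount (c :: s) = pvDelta c + pvSegCount s := by
  unfold pvSegCount pvDelta
  by_cases h1 : c = '{' <;> by_cases h2 : c = '(' <;> by_cases h3 : c = '}' <;> by_cases h4 : c = ')' <;>
    simp_all <;> ring

lemma pvSegCount_nil : pvSegCount [] = 0 := by simp [pvSegCount]

lemma splitOn_ne_nil (cs : List Char) : cs.splitOn ';' ≠ [] := by
  simp [List.splitOn, List.splitOnP_ne_nil]

lemma findEndIndexGo_eq (cs : List Char) (count : Int) (i : Nat) :
    findEndIndexGo cs count i =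
      findEndIndexAltGo (cs.splitOn ';') count i (i + cs.length) := by
  induction cs generalizing count i with
  | nil =>
    simp [findEndIndexGo, List.splitOn, findEndIndexAltGo]
  | cons c rest ih =>
    have hdelta :
        (if c = '}' ∨ c = ')' then (if c = '{' ∨ c = '(' then count + 1 else count) - 1
          else (if c = '{' ∨ c = '(' then count + 1 else count)) = count + pvDelta c := by
      unfold pvDelta; split_ifs <;> omega
    by_cases hc : c = ';'
    · subst hc
      have hsplit : (';' :: rest).splitOn ';' = [] :: rest.splitOn ';' := by
        simp [List.splitOn, List.splitOnP_cons]
      have hd : pvDelta ';' = 0 := by decide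
      rw [hsplit]
      simp only [findEndIndexGo, findEndIndexAltGo, hdelta, hd, pvSegCount_nil,
        add_zero, List.length_nil, List.length_cons]
      have hlt : i < i + (rest.length + 1) := by omega
      rw [if_pos hlt]
      by_cases h0 : count = 0
      · simp [h0]
      · simp only [h0, and_true, if_false]
        rw [ih count (i + 1)]
        congr 1
        omega
    · obtain ⟨s, ss, hss⟩ : ∃ s ss, rest.splitOn ';' = s :: ss := by
        cases h : rest.splitOn ';' with
        | nil => exact absurd h (splitOn_ne_nil rest)
        | cons s ss => exact ⟨s, ss, rfl⟩
      have hsplit : (c :: rest).splitOn ';' = (c :: s) :: ss := by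
        simp only [List.splitOn, List.splitOnP_cons] at *
        rw [hss]
        simp [hc]
      rw [hsplit]
      simp only [findEndIndexGo, hdelta]
      have hcfalse : ¬ (count + pvDelta c = 0 ∧ c = ';') := fun h => hc h.2
      rw [if_neg hcfalse, ih (count + pvDelta c) (i + 1), hss]
      simp only [findEndIndexAltGo, pvSegCount_cons, List.length_cons]
      have e1 : count + (pvDelta c + pvSegCount s) = count + pvDelta c + pvSegCount s := by ring
      have e2 : i + (s.length + 1) = i + 1 + s.length := by omega
      have e3 : i + (rest.length + 1) = i + 1 + rest.length := by omega
      rw [e1, e2, e3]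

-- ===== VERDICT (by name: the statement is the Claim_ definition above) =====
theorem findEndIndex_spec : Claim_equal_findEndIndex := by
  intro s _
  show findEndIndex s = findEndIndex_alt s
  unfold findEndIndex findEndIndex_alt
  rw [findEndIndexGo_eq]
  norm_num
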